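-- pv_equiv track=rewrite | github.com/Adeel925/Using-network-science-to-gain-insights-into-scientific-litrature | graph.py | comparisonOfcommunites
-- ===== SOURCE A (Python) =====
-- from collections import Counter
--
-- def comparisonOfcommunites(comListcount):
--     Lis = []
--     for com in comListcount:
--         dic = dict(Counter(comListcount[com]))
--         dic_sorted_keys = sorted(dic, key=dic.get, reverse=True)
--         dicComOthers = {}
--         i = 0
--         for word in dic_sorted_keys:
--             comTopwords = []
--             if i>5:
--                 break
--             else:
--                 detail = (com, dic[word])
--                 comTopwords.append(dic[word])
--                 for comothers in comListcount:
--                     if (comothers != com):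
--                         dicc = dict(Counter(comListcount[comothers]))
--                         for wor  in dicc:
--                             if (wor == word):
--                                 detail = (comothers, dicc[wor])
--                                 comTopwords.append(dicc[wor])
--                                 break
--                             else:
--                                 continue
--             i+=1
--             dicComOthers[word] = comTopwords
--         Lis.append(dicComOthers)
--     return Lis
-- ===== SOURCE B (Python) =====
-- from collections import Counter
--
-- def comparisonOfcommunites(comListcount):
--     # one pass: per-community counters, then an inverted index word -> {community: count}
--     counters = [(com, Counter(words)) for com, words in comListcount.items()]
--     index = {}
--     for com, cnt in counters:
--         for w, c in cnt.items():
--             index.setdefault(w, {})[com] = c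
--     result = []
--     for com, cnt in counters:
--         top = sorted(cnt, key=cnt.get, reverse=True)[:6]
--         result.append({w: [cnt[w]] + [c for o, c in index[w].items() if o != com]
--                        for w in top})
--     return result
-- ===== Notes on version B (the rewrite author's own statement) =====
-- stated objective: faster
-- what changed: B builds each community's Counter once and an inverted index word -> {community: count} in one pass, then answers every top-word row by index lookup, instead of A's rebuilding the Counter of every other community (and scanning its keys with a break) for each of up to six top words of each community.
import Mathlib
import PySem

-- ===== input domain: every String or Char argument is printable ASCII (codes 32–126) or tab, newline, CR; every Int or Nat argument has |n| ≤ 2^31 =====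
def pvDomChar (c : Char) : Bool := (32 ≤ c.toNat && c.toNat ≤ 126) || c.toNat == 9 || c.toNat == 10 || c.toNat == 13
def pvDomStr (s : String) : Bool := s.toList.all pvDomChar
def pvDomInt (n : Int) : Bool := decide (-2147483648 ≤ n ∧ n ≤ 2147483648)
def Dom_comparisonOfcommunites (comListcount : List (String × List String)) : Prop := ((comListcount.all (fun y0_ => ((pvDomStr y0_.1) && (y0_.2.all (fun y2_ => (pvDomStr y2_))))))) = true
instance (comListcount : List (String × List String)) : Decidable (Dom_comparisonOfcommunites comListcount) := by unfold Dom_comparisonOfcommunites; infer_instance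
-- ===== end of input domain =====

-- B replaces A's per-top-word rescan of every other community (rebuilding its Counter each time)
-- by per-community counters built once plus an inverted index word -> {community: count}; faster by that mechanism.
-- The dict argument is modelled as an association list; Pre_ restricts to distinct community names
-- (a Python dict cannot carry duplicate keys, so this excludes only representation artefacts).

-- ===== PORT A =====
-- 'for wor in dicc: if wor == word: …append(dicc[wor]); break' — scan the dict's items, first match wins
def pvScanBreak : List (String × Int) → String → Option Int
  | [], _ => none
  | (k, v) :: rest, w => if k == w then some v else pvScanBreak rest w

-- inner 'for comothers in comListcount' loop of A (keys + lookup, Counter rebuilt per other community)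
def pvOthersA (cl : List (String × List String)) (com word : String) (acc : List Int) : List Int :=
  (cl.map Prod.fst).foldl (fun acc other =>
    if other ≠ com then
      match pvScanBreak (PySem.Dict.counter ((PySem.Dict.mk cl).getD other [])).items word with
      | some c => acc ++ [c]
      | none => acc
    else acc) acc

-- A's word loop with counter i and 'if i > 5: break'
def pvWordLoopA (cl : List (String × List String)) (com : String) (dic : PySem.Dict String Int) :
    List String → Int → PySem.Dict String (List Int) → PySem.Dict String (List Int)
  | [], _, d => d
  | word :: rest, i, d =>
    if i > 5 then d
    else pvWordLoopA cl com dic rest (i + 1)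
      (d.insert word (pvOthersA cl com word [dic.getD word 0]))

def comparisonOfcommunites (comListcount : List (String × List String)) : List (List (String × List Int)) :=
  (comListcount.map Prod.fst).foldl (fun Lis com =>
    let dic := PySem.Dict.counter ((PySem.Dict.mk comListcount).getD com [])
    Lis ++ [(pvWordLoopA comListcount com dic
              (PySem.List.sorted dic.keys (fun w => dic.getD w 0) true) 0 PySem.Dict.empty).items]) []

-- ===== PORT B =====
-- index = {}; for com, cnt in counters: for w, c in cnt.items(): index.setdefault(w, {})[com] = c
def pvBuildIndex (counters : List (String × PySem.Dict String Int)) :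
    PySem.Dict String (PySem.Dict String Int) :=
  counters.foldl (fun idx p =>
    p.2.items.foldl (fun idx wc =>
      idx.insert wc.1 ((idx.getD wc.1 PySem.Dict.empty).insert p.1 wc.2)) idx)
    PySem.Dict.empty

def comparisonOfcommunites_alt (comListcount : List (String × List String)) : List (List (String × List Int)) :=
  let counters := comListcount.map (fun p => (p.1, PySem.Dict.counter p.2))
  let idx := pvBuildIndex counters
  counters.map (fun p =>
    ((PySem.List.sorted p.2.keys (fun w => p.2.getD w 0) true).take 6).map (fun w =>
      (w, p.2.getD w 0 ::
        ((idx.getD w PySem.Dict.empty).items.filter (fun oc => oc.1 ≠ p.1)).map Prod.snd)))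

-- ===== PRECONDITION & SPEC =====
-- Pre_ excludes association lists with duplicate community names: a Python dict argument cannot
-- carry duplicate keys, so these inputs are representation artefacts, not dict inputs A accepts.
def Pre_comparisonOfcommunites (comListcount : List (String × List String)) : Prop :=
  (comListcount.map Prod.fst).Nodup
instance (comListcount : List (String × List String)) : Decidable (Pre_comparisonOfcommunites comListcount) := by unfold Pre_comparisonOfcommunites; infer_instance

def pvWitness_comparisonOfcommunites : (List (String × List String)) :=
  [("a", ["x", "y", "x"]), ("b", ["x"])]

def Spec_comparisonOfcommunites (comListcount : List (String × List String)) (out : List (List (String × List Int))) : Prop := out = comparisonOfcommunites_alt comListcount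
instance (comListcount : List (String × List String)) (out : List (List (String × List Int))) : Decidable (Spec_comparisonOfcommunites comListcount out) := by unfold Spec_comparisonOfcommunites; infer_instance

-- ===== CLAIM (what is proved, stated in full; the proofs are below) =====
def Claim_equal_comparisonOfcommunites : Prop := ∀ (comListcount : List (String × List String)), Dom_comparisonOfcommunites comListcount → Pre_comparisonOfcommunites comListcount → Spec_comparisonOfcommunites comListcount (comparisonOfcommunites comListcount)

-- ===== LEMMAS AND PROOFS =====

-- the closed form both inner computations reduce to
def pvSpecOthers (cl : List (String × List String)) (com word : String) : List Int :=
  ((cl.filterMap (fun q => ((PySem.Dict.counter q.2).get? word).map (fun c => (q.1, c)))).filter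
    (fun oc => oc.1 ≠ com)).map Prod.snd

theorem pvScanBreak_eq_get? (l : List (String × Int)) (w : String) :
    pvScanBreak l w = (PySem.Dict.mk l).get? w := by
  induction l with
  | nil => rfl
  | cons p rest ih => cases p; simp [pvScanBreak, PySem.Dict.get?_mk_cons, ih]

theorem pvScanBreak_items (d : PySem.Dict String Int) (w : String) :
    pvScanBreak d.items w = d.get? w := by
  cases d; simpa using pvScanBreak_eq_get? _ w

theorem pvScanBreak_of_not_mem (l : List (String × Int)) (w : String)
    (h : w ∉ l.map Prod.fst) : pvScanBreak l w = none := by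
  induction l with
  | nil => rfl
  | cons p rest ih =>
    cases p with
    | mk k v =>
      simp only [List.map_cons, List.mem_cons, not_or] at h
      simp [pvScanBreak, beq_iff_eq, Ne.symm h.1, ih h.2]

theorem pvLookup_eq (cl : List (String × List String)) (p : String × List String)
    (hmem : p ∈ cl) (hnd : (cl.map Prod.fst).Nodup) :
    (PySem.Dict.mk cl).getD p.1 [] = p.2 := by
  apply PySem.Dict.getD_of_mem_items (k := p.1) (v := p.2)
  · simpa using hmem
  · simpa [PySem.Dict.keys] using hnd

theorem pvOthersFold (com w : String) (l : List (String × List String)) (acc : List Int) :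
    l.foldl (fun acc q =>
      if q.1 ≠ com then
        match (PySem.Dict.counter q.2).get? w with
        | some c => acc ++ [c]
        | none => acc
      else acc) acc
    = acc ++ pvSpecOthers l com w := by
  induction l generalizing acc with
  | nil => simp [pvSpecOthers]
  | cons q rest ih =>
    simp only [List.foldl_cons, ih]
    by_cases hq : q.1 ≠ com <;>
      cases hget : (PySem.Dict.counter q.2).get? w <;>
        simp [pvSpecOthers, hq, hget]

theorem pvOthersA_eq (cl : List (String × List String)) (com w : String) (acc : List Int)
    (hnd : (cl.map Prod.fst).Nodup) :
    pvOthersA cl com w acc = acc ++ pvSpecOthers cl com w := by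
  unfold pvOthersA
  calc (cl.map Prod.fst).foldl (fun acc other =>
        if other ≠ com then
          match pvScanBreak (PySem.Dict.counter ((PySem.Dict.mk cl).getD other [])).items w with
          | some c => acc ++ [c]
          | none => acc
        else acc) acc
      = cl.foldl (fun acc q =>
          if q.1 ≠ com then
            match pvScanBreak (PySem.Dict.counter ((PySem.Dict.mk cl).getD q.1 [])).items w with
            | some c => acc ++ [c]
            | none => acc
          else acc) acc := by rw [List.foldl_map]
    _ = cl.foldl (fun acc q =>
          if q.1 ≠ com then
            match (PySem.Dict.counter q.2).get? w with
            | some c => acc ++ [c]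
            | none => acc
          else acc) acc := by
          apply PySem.List.foldl_congr_mem
          intro acc q hq
          rw [pvLookup_eq cl q hq hnd, pvScanBreak_items]
    _ = acc ++ pvSpecOthers cl com w := pvOthersFold com w cl acc

-- the inner index-building fold, for one community 'com', characterised per queried word
theorem pvIdxInner (com : String) (items : List (String × Int))
    (hnd : (items.map Prod.fst).Nodup) :
    ∀ (idx : PySem.Dict String (PySem.Dict String Int)) (w : String),
    (items.foldl (fun idx wc =>
        idx.insert wc.1 ((idx.getD wc.1 PySem.Dict.empty).insert com wc.2)) idx).getD w
        PySem.Dict.empty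
    = match pvScanBreak items w with
      | some c => (idx.getD w PySem.Dict.empty).insert com c
      | none => idx.getD w PySem.Dict.empty := by
  induction items with
  | nil => intro idx w; simp [pvScanBreak]
  | cons kv rest ih =>
    obtain ⟨k, v⟩ := kv
    simp only [List.map_cons, List.nodup_cons] at hnd
    intro idx w
    rw [List.foldl_cons, ih hnd.2]
    by_cases hw : w = k
    · subst hw
      rw [pvScanBreak_of_not_mem rest w hnd.1]
      simp [pvScanBreak, PySem.Dict.getD_insert_self]
    · simp [pvScanBreak, beq_iff_eq, Ne.symm hw, PySem.Dict.getD_insert, hw]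

theorem pvIdxOuter (counters : List (String × PySem.Dict String Int)) :
    ∀ (idx : PySem.Dict String (PySem.Dict String Int)) (w : String),
    (∀ p ∈ counters, (p.2.items.map Prod.fst).Nodup) →
    (counters.map Prod.fst).Nodup →
    (∀ p ∈ counters, (idx.getD w PySem.Dict.empty).contains p.1 = false) →
    ((counters.foldl (fun idx p =>
        p.2.items.foldl (fun idx wc =>
          idx.insert wc.1 ((idx.getD wc.1 PySem.Dict.empty).insert p.1 wc.2)) idx) idx).getD w
        PySem.Dict.empty).items
    = (idx.getD w PySem.Dict.empty).items
      ++ counters.filterMap (fun q => (q.2.get? w).map (fun c => (q.1, c))) := by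
  induction counters with
  | nil => intro idx w _ _ _; simp
  | cons p rest ih =>
    intro idx w hk hnd hfresh
    simp only [List.map_cons, List.nodup_cons] at hnd
    rw [List.foldl_cons]
    have hinner := pvIdxInner p.1 p.2.items (hk p (by simp)) idx w
    rw [pvScanBreak_items] at hinner
    rw [ih _ w (fun q hq => hk q (List.mem_cons_of_mem _ hq)) hnd.2 ?_]
    · rw [hinner]
      cases hget : p.2.get? w with
      | none => simp [hget]
      | some c =>
        rw [PySem.Dict.items_insert_of_not_contains _ _ (hfresh p (by simp))]
        simp [hget]
    · intro q hq
      rw [hinner]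
      have hne : q.1 ≠ p.1 := by
        intro h; exact hnd.1 (h ▸ List.mem_map_of_mem hq)
      cases hget : p.2.get? w with
      | none => simpa [hget] using hfresh q (List.mem_cons_of_mem _ hq)
      | some c =>
        rw [PySem.Dict.contains_insert]
        simp [hne, hfresh q (List.mem_cons_of_mem _ hq)]


-- A's bounded word loop equals a map over 'take'
theorem pvWordLoopA_items (cl : List (String × List String)) (com : String)
    (dic : PySem.Dict String Int) (ws : List String) (hnd : ws.Nodup) :
    ∀ (i : Int) (d : PySem.Dict String (List Int)), 0 ≤ i →
    (∀ w ∈ ws, d.contains w = false) →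
    (pvWordLoopA cl com dic ws i d).items
    = d.items ++ (ws.take (6 - i).toNat).map
        (fun w => (w, pvOthersA cl com w [dic.getD w 0])) := by
  induction ws with
  | nil => intro i d _ _; simp [pvWordLoopA]
  | cons w rest ih =>
    simp only [List.nodup_cons] at hnd
    intro i d hi hfresh
    by_cases h6 : i > 5
    · have h0 : (6 - i).toNat = 0 := by omega
      simp [pvWordLoopA, h6, h0]
    · have htake : (6 - i).toNat = (6 - (i + 1)).toNat + 1 := by omega
      rw [pvWordLoopA]
      simp only [if_neg h6]
      rw [ih hnd.2 (i + 1) _ (by omega) ?_]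
      · rw [PySem.Dict.items_insert_of_not_contains _ _ (hfresh w (by simp)),
          htake, List.take_succ_cons]
        simp
      · intro w' hw'
        rw [PySem.Dict.contains_insert]
        have hne : w' ≠ w := by intro h; exact hnd.1 (h ▸ hw')
        simp [hne, hfresh w' (List.mem_cons_of_mem _ hw')]

-- ===== VERDICT (by name: the statement is the Claim_ definition above) =====
theorem comparisonOfcommunites_spec : Claim_equal_comparisonOfcommunites := by
  intro cl _hdom hpre
  unfold Spec_comparisonOfcommunites
  unfold comparisonOfcommunites comparisonOfcommunites_alt
  rw [PySem.List.foldl_append_singleton_eq_map, List.map_map, List.map_map]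
  simp only [List.nil_append]
  apply List.map_congr_left
  intro p hp
  have hdic : PySem.Dict.counter ((PySem.Dict.mk cl).getD p.1 []) = PySem.Dict.counter p.2 := by
    rw [pvLookup_eq cl p hp hpre]
  simp only [Function.comp_apply, hdic]
  have hwsnd : (PySem.List.sorted (PySem.Dict.counter p.2).keys
      (fun w => (PySem.Dict.counter p.2).getD w 0) true).Nodup :=
    (PySem.List.sorted_perm _ _ _).nodup_iff.mpr (PySem.Dict.nodup_keys_counter p.2)
  rw [pvWordLoopA_items cl p.1 (PySem.Dict.counter p.2) _ hwsnd 0 PySem.Dict.empty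
      (by norm_num) (by intro w _; simp)]
  simp only [PySem.Dict.empty, List.nil_append]
  have h60 : ((6 : Int) - 0).toNat = 6 := by decide
  rw [h60]
  apply List.map_congr_left
  intro w hw
  rw [pvOthersA_eq cl p.1 w _ hpre]
  simp only [List.singleton_append, Prod.mk.injEq, true_and]
  -- reduce B's index lookup to the same closed form
  have hkeys : ((cl.map (fun p => (p.1, PySem.Dict.counter p.2))).map Prod.fst).Nodup := by
    simpa using hpre
  have hidx := pvIdxOuter (cl.map (fun p => (p.1, PySem.Dict.counter p.2)))
      PySem.Dict.empty w
      (by intro q hq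
          simp only [List.mem_map] at hq
          obtain ⟨r, _, rfl⟩ := hq
          simpa [PySem.Dict.keys] using PySem.Dict.nodup_keys_counter r.2)
      hkeys
      (by intro q _; simp)
  unfold pvBuildIndex
  simp only [PySem.Dict.empty] at hidx ⊢
  rw [hidx]
  simp only [List.filterMap_map]
  unfold pvSpecOthers
  rfl
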